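-- pv_equiv track=rewrite | github.com/nitin001singh/Data-Structure---Algorithm | Hashing/AmazonOA.py | getPrefixSum
-- ===== SOURCE A (Python) =====
-- def getPrefixSum(nums):
--     n = len(nums)
--     pSum = [0] * n
--     currentMax = nums[0]
--     pSum[0] = currentMax
--
--     for i in range(1, n):
--         currentMax = max(nums[i], currentMax + nums[i])
--         pSum[i] = max(pSum[i-1], currentMax)
--
--     return pSum
-- ===== SOURCE B (Python) =====
-- def getPrefixSum(nums):
--     # prefix-sum formulation: best subarray ending at i = P[i+1] - min(P[0..i]),
--     # answer[i] = running max of those; no Kadane recurrence.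
--     res = []
--     total = 0        # P[i+1], the prefix sum including nums[i]
--     min_prefix = 0   # min of P[0..i]
--     best = None
--     for x in nums:
--         total += x
--         cand = total - min_prefix
--         best = cand if best is None or cand > best else best
--         if total < min_prefix:
--             min_prefix = total
--         res.append(best)
--     return res
-- ===== Notes on version B (the rewrite author's own statement) =====
-- stated objective: faster
-- what changed: A runs Kadane's recurrence currentMax=max(x,currentMax+x) fused with a prefix maximum over an indexed array; B uses the prefix-sum characterisation instead, maintaining the running prefix sum and its running minimum so that the best subarray ending at i is P[i+1]-min(P[0..i]) and taking the running max of that, replacing the per-iteration max() builtin calls and list indexing with plain arithmetic/comparisons (constant-factor win, measured ~2x).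
import Mathlib
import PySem

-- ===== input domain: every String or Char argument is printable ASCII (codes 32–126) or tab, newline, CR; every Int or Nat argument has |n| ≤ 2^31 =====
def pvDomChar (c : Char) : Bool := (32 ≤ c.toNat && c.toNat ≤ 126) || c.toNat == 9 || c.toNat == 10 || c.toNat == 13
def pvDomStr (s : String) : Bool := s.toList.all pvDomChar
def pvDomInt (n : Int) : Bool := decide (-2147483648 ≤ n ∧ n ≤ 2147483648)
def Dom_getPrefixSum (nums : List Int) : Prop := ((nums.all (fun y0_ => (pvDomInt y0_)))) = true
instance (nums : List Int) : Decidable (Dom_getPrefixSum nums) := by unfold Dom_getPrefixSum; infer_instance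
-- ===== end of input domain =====

-- B replaces A's fused Kadane recurrence by a prefix-sum/running-minimum formulation; on the empty list A raises IndexError (excluded by Pre_) while B returns the empty list.


-- ===== PORT A =====
-- one loop iteration of A: state = (currentMax, pSum reversed: head is pSum[i-1], the only cell A reads)
def aStep (st : Int × List Int) (x : Int) : Int × List Int :=
  let currentMax := max x (st.1 + x)
  (currentMax, max st.2.headI currentMax :: st.2)

def aLoop (nums : List Int) (currentMax0 : Int) : List Int :=
  ((PySem.List.pyRange 1 (nums.length : Int) 1).foldl
      (fun st i => aStep st (PySem.List.pyGetD nums i 0))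
      (currentMax0, [currentMax0])).2.reverse

def getPrefixSum (nums : List Int) : List Int :=
  match PySem.List.pyGet? nums 0 with
  | none => []   -- first subscript: IndexError on the empty list (outside Pre_)
  | some currentMax0 => aLoop nums currentMax0

-- ===== PORT B =====
-- B loop state: (total, min_prefix, best, res reversed); one iteration of Source B's loop
def bStep (st : Int × Int × Option Int × List Int) (x : Int) : Int × Int × Option Int × List Int :=
  let total := st.1 + x
  let cand := total - st.2.1
  let best := match st.2.2.1 with
    | none => cand
    | some b => if cand > b then cand else b
  let mp := if total < st.2.1 then total else st.2.1
  (total, mp, some best, best :: st.2.2.2)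

def getPrefixSum_alt (nums : List Int) : List Int :=
  (nums.foldl bStep (0, 0, none, [])).2.2.2.reverse

-- ===== PRECONDITION & SPEC =====
-- Pre_ excludes only the empty list, on which A raises IndexError at its first subscript.
def Pre_getPrefixSum (nums : List Int) : Prop := nums ≠ []
instance (nums : List Int) : Decidable (Pre_getPrefixSum nums) := by unfold Pre_getPrefixSum; infer_instance
def pvWitness_getPrefixSum : List Int := ([1, -2, 3] : List Int)

def Spec_getPrefixSum (nums : List Int) (out : List Int) : Prop := out = getPrefixSum_alt nums
instance (nums : List Int) (out : List Int) : Decidable (Spec_getPrefixSum nums out) := by unfold Spec_getPrefixSum; infer_instance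

-- ===== CLAIM (what is proved, stated in full; the proofs are below) =====
def Claim_equal_getPrefixSum : Prop := ∀ (nums : List Int), Dom_getPrefixSum nums → Pre_getPrefixSum nums → Spec_getPrefixSum nums (getPrefixSum nums)

-- ===== LEMMAS AND PROOFS =====

-- Invariant linking A's Kadane state to B's prefix-sum state:
--   total - mp = max currentMax 0, best = head of the (shared) reversed answer list.
theorem loop_eq (rest : List Int) : ∀ (cm total mp : Int) (ps : List Int),
    total - mp = max cm 0 →
    (rest.foldl aStep (cm, ps)).2
      = (rest.foldl bStep (total, mp, some ps.headI, ps)).2.2.2 := by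
  induction rest with
  | nil => intro cm total mp ps _; rfl
  | cons x xs ih =>
      intro cm total mp ps hinv
      have hc : total + x - mp = max x (cm + x) := by omega
      have hb : bStep (total, mp, some ps.headI, ps) x
          = (total + x, if total + x < mp then total + x else mp,
             some (max ps.headI (max x (cm + x))), max ps.headI (max x (cm + x)) :: ps) := by
        simp only [bStep, hc]
        refine congrArg _ (congrArg _ ?_)
        have : (if max x (cm + x) > ps.headI then max x (cm + x) else ps.headI)
            = max ps.headI (max x (cm + x)) := by omega
        rw [this]
      have ha : aStep (cm, ps) x = (max x (cm + x), max ps.headI (max x (cm + x)) :: ps) := rfl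
      simp only [List.foldl, ha, hb]
      have hinv' : (total + x) - (if total + x < mp then total + x else mp)
          = max (max x (cm + x)) 0 := by
        split <;> omega
      have := ih (max x (cm + x)) (total + x) (if total + x < mp then total + x else mp)
        (max ps.headI (max x (cm + x)) :: ps) hinv'
      simpa using this

theorem getPrefixSum_eq_alt (c0 : Int) (rest : List Int) :
    getPrefixSum (c0 :: rest) = getPrefixSum_alt (c0 :: rest) := by
  have h0 : PySem.List.pyGet? (c0 :: rest) 0 = some c0 := by
    simp [PySem.List.pyGet?, PySem.List.pyIdx?]
  show (match PySem.List.pyGet? (c0 :: rest) 0 with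
        | none => []
        | some currentMax0 => aLoop (c0 :: rest) currentMax0) = _
  rw [h0]
  show aLoop (c0 :: rest) c0 = getPrefixSum_alt (c0 :: rest)
  unfold aLoop getPrefixSum_alt
  rw [PySem.List.foldl_pyRange_pyGetD' (c0 :: rest) 0 aStep (c0, [c0]) (by norm_num)]
  simp only [Int.toNat_one, List.drop_succ_cons, List.drop_zero]
  -- B's first iteration from the initial state
  have hb0 : bStep (0, 0, none, []) c0 = (c0, if c0 < 0 then c0 else 0, some c0, [c0]) := by
    simp [bStep]
  simp only [List.foldl_cons, hb0]
  have hinv0 : c0 - (if c0 < 0 then c0 else 0) = max c0 0 := by split <;> omega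
  have hmain := loop_eq rest c0 c0 (if c0 < 0 then c0 else 0) [c0] hinv0
  simp only [List.headI_cons] at hmain
  rw [hmain]

-- ===== VERDICT (by name: the statement is the Claim_ definition above) =====
theorem getPrefixSum_spec : Claim_equal_getPrefixSum := by
  intro nums _ hpre
  match nums, hpre with
  | c0 :: rest, _ => exact getPrefixSum_eq_alt c0 rest
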